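-- pv_equiv track=rewrite | github.com/JulianNicolai/game-of-life-gif-creator | game_of_life.py | extract_single_coord
-- ===== SOURCE A (Python) =====
-- from typing import List, Tuple
--
-- def extract_single_coord(inputString: str) -> Tuple[int]:
--     xyList, coord = [], []
--     lastDigit = False
--     for char in inputString:
--         if char.isdigit():
--
--             if lastDigit == True:
--                 xyList[-1] += char
--             else:
--                 xyList += [char]
--
--             lastDigit = True
--
--         else:
--             lastDigit = False
--
--     for item in xyList:
--         coord += [int(item)]
--
--     for num in range(len(coord)):
--         if coord[num] > 255:
--             coord[num] = 255
--
--     return tuple(coord)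
-- ===== SOURCE B (Python) =====
-- def extract_single_coord(inputString: str):
--     # Mask every non-digit character to a space, then split on whitespace:
--     # the resulting tokens are exactly the maximal digit runs.
--     tokens = ''.join(c if c.isdigit() else ' ' for c in inputString).split()
--     return tuple(min(int(t), 255) for t in tokens)
-- ===== Notes on version B (the rewrite author's own statement) =====
-- stated objective: simpler
-- what changed: Replaces A's three passes (a lastDigit state machine appending to xyList[-1], an int() conversion loop, and an index loop clamping in place) with a single expression: mask non-digits to spaces, str.split() into maximal digit runs, and one comprehension doing min(int(t), 255).
import Mathlib
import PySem

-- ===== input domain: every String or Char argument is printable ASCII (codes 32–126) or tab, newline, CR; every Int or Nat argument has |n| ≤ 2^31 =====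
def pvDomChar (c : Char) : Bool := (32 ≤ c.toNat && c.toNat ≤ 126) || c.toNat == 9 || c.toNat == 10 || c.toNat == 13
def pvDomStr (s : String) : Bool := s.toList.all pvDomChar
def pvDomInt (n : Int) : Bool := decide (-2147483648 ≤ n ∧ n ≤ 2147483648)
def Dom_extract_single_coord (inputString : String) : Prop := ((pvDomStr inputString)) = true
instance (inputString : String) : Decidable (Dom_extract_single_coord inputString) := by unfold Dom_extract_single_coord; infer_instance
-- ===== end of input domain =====

-- B masks non-digits to spaces and splits on whitespace, instead of A's lastDigit state machine; objective: simpler.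

-- ===== PORT A =====
-- the body of A's first loop (lastDigit state machine over the characters)
def pvStepA (s : List (List Char) × Bool) (char : Char) : List (List Char) × Bool :=
  if PySem.Chars.isdigit char then
    (if s.2 then s.1.dropLast ++ [s.1.getLastD [] ++ [char]] else s.1 ++ [[char]], true)
  else (s.1, false)

def extract_single_coord (inputString : String) : List Int :=
  let st := inputString.toList.foldl pvStepA ([], false)
  -- int(item): item is always a nonempty digit run, so ofChars? is `some`; the getD 0 default never fires
  let coord := st.1.foldl (fun acc item => acc ++ [(PySem.Int.ofChars? item).getD 0]) []
  (PySem.List.pyRange 0 coord.length 1).foldl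
    (fun cd num => if PySem.List.pyGetD cd num 0 > 255 then cd.set num.toNat 255 else cd) coord

-- ===== PORT B =====
def extract_single_coord_alt (inputString : String) : List Int :=
  let tokens := PySem.Chars.split₀ (inputString.toList.map (fun c => if PySem.Chars.isdigit c then c else ' '))
  tokens.map (fun t => min ((PySem.Int.ofChars? t).getD 0) 255)

-- ===== PRECONDITION & SPEC =====
def Spec_extract_single_coord (inputString : String) (out : List Int) : Prop := out = extract_single_coord_alt inputString
instance (inputString : String) (out : List Int) : Decidable (Spec_extract_single_coord inputString out) := by unfold Spec_extract_single_coord; infer_instance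

-- ===== CLAIM (what is proved, stated in full; the proofs are below) =====
def Claim_equal_extract_single_coord : Prop := ∀ (inputString : String), Dom_extract_single_coord inputString → Spec_extract_single_coord inputString (extract_single_coord inputString)

-- ===== LEMMAS AND PROOFS =====

-- the maximal digit runs of a character list, in order (proof-side characterisation of both programs)
def pvGroups : List Char → List (List Char)
  | [] => []
  | c :: cs =>
    if PySem.Chars.isdigit c then
      (c :: cs.takeWhile PySem.Chars.isdigit) :: pvGroups (cs.dropWhile PySem.Chars.isdigit)
    else pvGroups cs
  termination_by cs => cs.length
  decreasing_by
    · exact Nat.lt_succ_of_le (List.length_dropWhile_le _ _)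
    · exact Nat.lt_succ_self _

lemma pv_isspace_of_isdigit (c : Char) (h : PySem.Chars.isdigit c = true) :
    PySem.Chars.isspace c = false := by
  simp only [PySem.Chars.isdigit, Bool.and_eq_true, decide_eq_true_eq, Char.le_def,
    UInt32.le_iff_toNat_le] at h
  have h' : 48 ≤ c.val.toNat ∧ c.val.toNat ≤ 57 := ⟨h.1, h.2⟩
  simp only [PySem.Chars.isspace, Char.toNat, Bool.or_eq_false_iff, Bool.and_eq_false_iff,
    decide_eq_false_iff_not]
  omega

-- A's state machine computes pvGroups
lemma pv_foldA (cs : List Char) :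
    (∀ xy : List (List Char), ∃ b, cs.foldl pvStepA (xy, false) = (xy ++ pvGroups cs, b)) ∧
    (∀ (xy : List (List Char)) (t : List Char), ∃ b,
      cs.foldl pvStepA (xy ++ [t], true)
        = (xy ++ (t ++ cs.takeWhile PySem.Chars.isdigit)
              :: pvGroups (cs.dropWhile PySem.Chars.isdigit), b)) := by
  induction cs with
  | nil => exact ⟨fun xy => ⟨false, by simp [pvGroups]⟩, fun xy t => ⟨true, by simp [pvGroups]⟩⟩
  | cons c cs ih =>
    constructor
    · intro xy
      by_cases hc : PySem.Chars.isdigit c = true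
      · obtain ⟨b, hb⟩ := ih.2 xy [c]
        exact ⟨b, by simp [List.foldl_cons, pvStepA, hc, hb, pvGroups]⟩
      · obtain ⟨b, hb⟩ := ih.1 xy
        exact ⟨b, by simp [List.foldl_cons, pvStepA, hc, hb, pvGroups]⟩
    · intro xy t
      by_cases hc : PySem.Chars.isdigit c = true
      · obtain ⟨b, hb⟩ := ih.2 xy (t ++ [c])
        refine ⟨b, ?_⟩
        have hstep : pvStepA (xy ++ [t], true) c = (xy ++ [t ++ [c]], true) := by
          simp [pvStepA, hc]
        simp only [List.foldl_cons, hstep, hb]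
        simp [hc]
      · obtain ⟨b, hb⟩ := ih.1 (xy ++ [t])
        refine ⟨b, ?_⟩
        have hstep : pvStepA (xy ++ [t], true) c = (xy ++ [t], false) := by
          simp [pvStepA, hc]
        simp only [List.foldl_cons, hstep, hb]
        simp [hc, pvGroups]

-- split₀ of the masked list computes pvGroups
lemma pv_go (cs : List Char) :
    (∀ acc : List (List Char),
      PySem.Chars.split₀.go (cs.map (fun c => if PySem.Chars.isdigit c then c else ' ')) [] acc
        = acc.reverse ++ pvGroups cs) ∧
    (∀ (cur : List Char) (acc : List (List Char)), cur ≠ [] →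
      PySem.Chars.split₀.go (cs.map (fun c => if PySem.Chars.isdigit c then c else ' ')) cur acc
        = acc.reverse ++ (cur.reverse ++ cs.takeWhile PySem.Chars.isdigit)
            :: pvGroups (cs.dropWhile PySem.Chars.isdigit)) := by
  have hspace : PySem.Chars.isspace ' ' = true := by decide
  induction cs with
  | nil =>
    constructor
    · intro acc; simp [PySem.Chars.split₀.go, pvGroups]
    · intro cur acc hcur
      simp [PySem.Chars.split₀.go, List.isEmpty_iff, hcur, pvGroups]
  | cons c cs ih =>
    constructor
    · intro acc
      by_cases hc : PySem.Chars.isdigit c = true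
      · have hrec := ih.2 [c] acc (by simp)
        simp only [List.map_cons, if_pos hc]
        simp only [PySem.Chars.split₀.go, pv_isspace_of_isdigit c hc, Bool.false_eq_true,
          if_false]
        rw [hrec]
        simp [pvGroups, hc]
      · simp only [List.map_cons, if_neg hc]
        simp [PySem.Chars.split₀.go, hspace]
        rw [ih.1 acc]
        simp [pvGroups, hc]
    · intro cur acc hcur
      by_cases hc : PySem.Chars.isdigit c = true
      · have hrec := ih.2 (c :: cur) acc (by simp)
        simp only [List.map_cons, if_pos hc]
        simp only [PySem.Chars.split₀.go, pv_isspace_of_isdigit c hc, Bool.false_eq_true,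
          if_false]
        rw [hrec]
        simp [hc]
      · simp only [List.map_cons, if_neg hc]
        simp [PySem.Chars.split₀.go, hspace, List.isEmpty_iff, hcur]
        rw [ih.1 (cur.reverse :: acc)]
        simp [pvGroups, hc]

-- A's third loop (index-wise clamp in place) is an elementwise clamp
lemma pv_clampFold (suf : List Int) : ∀ pre : List Int,
    (PySem.List.pyRange (pre.length : Int) ((pre.length : Int) + suf.length) 1).foldl
      (fun cd num => if PySem.List.pyGetD cd num 0 > 255 then cd.set num.toNat 255 else cd)
      (pre ++ suf)
    = pre ++ suf.map (fun x => if x > 255 then 255 else x) := by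
  induction suf with
  | nil => intro pre; simp [PySem.List.pyRange]
  | cons x rest ih =>
    intro pre
    have hlt : (pre.length : Int) < (pre.length : Int) + (x :: rest).length := by
      simp only [List.length_cons]; push_cast; omega
    rw [PySem.List.pyRange_one_cons hlt]
    simp only [List.foldl_cons]
    have hget : PySem.List.pyGetD (pre ++ x :: rest) (pre.length : Int) 0 = x := by
      rw [PySem.List.pyGetD_natCast]
      simp
    have hset : (pre ++ x :: rest).set ((pre.length : Int)).toNat 255 = pre ++ 255 :: rest := by
      simp
    rw [hget]
    by_cases hx : x > 255
    · rw [if_pos (by omega), hset]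
      have hrec := ih (pre ++ [255])
      simp only [List.length_append, List.length_cons, List.length_nil, Nat.cast_add,
        Nat.cast_one, zero_add, List.append_assoc, List.singleton_append] at hrec ⊢
      rw [show ((pre.length : Int) + ((rest.length : Int) + 1))
            = (pre.length : Int) + 1 + (rest.length : Int) from by ring] at *
      rw [hrec]
      simp [hx]
    · rw [if_neg (by omega)]
      have hrec := ih (pre ++ [x])
      simp only [List.length_append, List.length_cons, List.length_nil, Nat.cast_add,
        Nat.cast_one, zero_add, List.append_assoc, List.singleton_append] at hrec ⊢
      rw [show ((pre.length : Int) + ((rest.length : Int) + 1))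
            = (pre.length : Int) + 1 + (rest.length : Int) from by ring] at *
      rw [hrec]
      simp [hx]

-- ===== VERDICT (by name: the statement is the Claim_ definition above) =====
theorem extract_single_coord_spec : Claim_equal_extract_single_coord := by
  intro s _
  unfold Spec_extract_single_coord extract_single_coord extract_single_coord_alt
  obtain ⟨b, hb⟩ := (pv_foldA s.toList).1 []
  rw [hb]
  simp only [List.nil_append]
  rw [PySem.List.foldl_append_singleton_eq_map]
  simp only [List.nil_append, List.length_map]
  have hcl := pv_clampFold
      ((pvGroups s.toList).map (fun item => (PySem.Int.ofChars? item).getD 0)) []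
  simp only [List.nil_append, List.length_nil, Nat.cast_zero, zero_add, List.length_map] at hcl
  rw [hcl]
  rw [show PySem.Chars.split₀ (s.toList.map (fun c => if PySem.Chars.isdigit c then c else ' '))
      = pvGroups s.toList from (pv_go s.toList).1 []]
  rw [List.map_map]
  apply List.map_congr_left
  intro t _
  simp only [Function.comp]
  omega
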